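-- pv_equiv track=rewrite | github.com/crsharrier/EDGAR | edgar/ref_data.py | parse_ticker_cik_txt
-- ===== SOURCE A (Python) =====
-- def parse_ticker_cik_txt(txt_content: str) -> list:
--     rows = []
--     ticker = ''
--     cik = ''
--     append_to_cik = False
--     for char in txt_content:
--         if char == '\t':
--             append_to_cik = True
--             continue
--         if char == '\n':
--             rows.append({'ticker': ticker, 'cik': cik})
--             ticker = ''
--             cik = ''
--             append_to_cik = False
--             continue
--         if append_to_cik:
--             cik += char
--         else:
--             ticker += char
--     return rows
-- ===== SOURCE B (Python) =====
-- def parse_ticker_cik_txt(txt_content: str) -> list: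
--     rows = []
--     for line in txt_content.split('\n')[:-1]:
--         parts = line.split('\t')
--         rows.append({'ticker': parts[0], 'cik': ''.join(parts[1:])})
--     return rows
-- ===== Notes on version B (the rewrite author's own statement) =====
-- stated objective: simpler
-- what changed: Replaces the per-character state machine (ticker/cik accumulators plus an append_to_cik flag) with a per-line decomposition: split on newlines, drop the unterminated last segment, and derive each row from a tab-split of the line.
import Mathlib
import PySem

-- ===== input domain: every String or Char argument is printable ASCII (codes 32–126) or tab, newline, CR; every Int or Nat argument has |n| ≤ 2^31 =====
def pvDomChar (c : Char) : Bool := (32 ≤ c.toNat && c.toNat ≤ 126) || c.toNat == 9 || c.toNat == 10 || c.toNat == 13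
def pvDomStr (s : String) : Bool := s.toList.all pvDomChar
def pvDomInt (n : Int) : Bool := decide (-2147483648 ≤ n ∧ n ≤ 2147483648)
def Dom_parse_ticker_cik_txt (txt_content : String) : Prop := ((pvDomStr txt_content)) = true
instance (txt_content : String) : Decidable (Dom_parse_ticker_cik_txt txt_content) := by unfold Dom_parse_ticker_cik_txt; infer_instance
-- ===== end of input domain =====

-- B replaces A's per-character state machine with a per-line split ('\n', drop the
-- unterminated last segment, tab-split each line): objective 'simpler', same O(n) cost.

-- ===== PORT A =====
-- A's loop state: (rows, ticker, cik, append_to_cik); strings are accumulated as List Char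
-- (ticker += char) and packed with String.ofList when a row is appended — exact on every input.
def pvStepA (st : List (List (String × String)) × List Char × List Char × Bool) (ch : Char) :
    List (List (String × String)) × List Char × List Char × Bool :=
  let (rows, ticker, cik, append_to_cik) := st
  if ch = '\t' then (rows, ticker, cik, true)
  else if ch = '\n' then
    (rows ++ [[("ticker", String.ofList ticker), ("cik", String.ofList cik)]], [], [], false)
  else if append_to_cik then (rows, ticker, cik ++ [ch], append_to_cik)
  else (rows, ticker ++ [ch], cik, append_to_cik)

def parse_ticker_cik_txt (txt_content : String) : List (List (String × String)) :=
  (txt_content.toList.foldl pvStepA ([], [], [], false)).1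

-- ===== PORT B =====
-- line.split('\t')[0]: split never returns an empty list, so headD is exact for parts[0]
def parse_ticker_cik_txt_alt (txt_content : String) : List (List (String × String)) :=
  (PySem.List.slice (PySem.Chars.splitOn txt_content.toList ['\n']) none (some (-1))).map
    (fun line =>
      [("ticker", String.ofList ((PySem.Chars.splitOn line ['\t']).headD [])),
       ("cik", String.ofList (PySem.Chars.join [] ((PySem.Chars.splitOn line ['\t']).drop 1)))])

-- ===== PRECONDITION & SPEC =====
def Spec_parse_ticker_cik_txt (txt_content : String) (out : List (List (String × String))) : Prop := out = parse_ticker_cik_txt_alt txt_content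
instance (txt_content : String) (out : List (List (String × String))) : Decidable (Spec_parse_ticker_cik_txt txt_content out) := by unfold Spec_parse_ticker_cik_txt; infer_instance

-- ===== CLAIM (what is proved, stated in full; the proofs are below) =====
def Claim_equal_parse_ticker_cik_txt : Prop := ∀ (txt_content : String), Dom_parse_ticker_cik_txt txt_content → Spec_parse_ticker_cik_txt txt_content (parse_ticker_cik_txt txt_content)

-- ===== LEMMAS AND PROOFS =====

-- single-character split, structurally recursive (characterisation of Chars.splitOn [c])
def pvSplit1 (c : Char) : List Char → List (List Char)
  | [] => [[]]
  | x :: xs => if x = c then [] :: pvSplit1 c xs else (pvSplit1 c xs).modifyHead (x :: ·)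

theorem pvSplit1_ne_nil (c : Char) (s : List Char) : pvSplit1 c s ≠ [] := by
  induction s with
  | nil => simp [pvSplit1]
  | cons x xs ih =>
    simp only [pvSplit1]
    split_ifs
    · simp
    · intro h
      cases hsp : pvSplit1 c xs with
      | nil => exact ih hsp
      | cons a l => rw [hsp] at h; simp [List.modifyHead] at h

theorem pvSplitOn_go_single (c : Char) (l : List Char) :
    ∀ (fuel : Nat) (cur : List Char) (acc : List (List Char)), l.length ≤ fuel →
    PySem.Chars.splitOn.go [c] fuel l cur acc
      = acc.reverse ++ (pvSplit1 c l).modifyHead (cur.reverse ++ ·) := by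
  induction l with
  | nil =>
    intro fuel cur acc _
    cases fuel <;> simp [PySem.Chars.splitOn.go, pvSplit1]
  | cons x xs ih =>
    intro fuel cur acc hle
    cases fuel with
    | zero => simp at hle
    | succ f =>
      simp only [PySem.Chars.splitOn.go]
      by_cases hx : c = x
      · have hpre : List.isPrefixOf [c] (x :: xs) = true := by simp [List.isPrefixOf, hx]
        simp only [hpre, if_true]
        have hdrop : List.drop [c].length (x :: xs) = xs := rfl
        rw [hdrop, ih f [] (cur.reverse :: acc) (by simpa using hle)]
        obtain ⟨p, ps, hp⟩ := List.exists_cons_of_ne_nil (pvSplit1_ne_nil c xs)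
        simp [pvSplit1, hx.symm, hp, List.modifyHead]
      · have hpre : List.isPrefixOf [c] (x :: xs) = false := by
          simp [List.isPrefixOf]
          intro h
          exact absurd h hx
        simp only [hpre, Bool.false_eq_true, if_false]
        rw [ih f (x :: cur) acc (by simpa using Nat.le_of_succ_le_succ hle)]
        have hxc : ¬ x = c := fun h => hx h.symm
        simp [pvSplit1, hxc]
        obtain ⟨p, ps, hp⟩ := List.exists_cons_of_ne_nil (pvSplit1_ne_nil c xs)
        simp [hp, List.modifyHead]

theorem pvSplitOn_single (c : Char) (s : List Char) :
    PySem.Chars.splitOn s [c] = pvSplit1 c s := by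
  unfold PySem.Chars.splitOn
  rw [pvSplitOn_go_single c s (s.length + 1) [] [] (by omega)]
  obtain ⟨p, ps, hp⟩ := List.exists_cons_of_ne_nil (pvSplit1_ne_nil c s)
  simp [hp, List.modifyHead]

-- the row A produces from accumulated state (t, c, b) when it has consumed 'line' before the newline
def pvRowOf (t cik : List Char) (b : Bool) (line : List Char) : List (String × String) :=
  let parts := pvSplit1 '\t' line
  if b then
    [("ticker", String.ofList t), ("cik", String.ofList (cik ++ PySem.Chars.join [] parts))]
  else
    [("ticker", String.ofList (t ++ parts.headD [])),
     ("cik", String.ofList (cik ++ PySem.Chars.join [] (parts.drop 1)))]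

-- rows produced by A from the line decomposition, starting from state (t, c, b); the last
-- (unterminated) segment produces no row
def pvMkRows : List (List Char) → List Char → List Char → Bool → List (List (String × String))
  | [], _, _, _ => []
  | [_], _, _, _ => []
  | l :: l' :: ls, t, c, b => pvRowOf t c b l :: pvMkRows (l' :: ls) [] [] false

theorem pvJoin_nil_cons (a : List Char) (ps : List (List Char)) :
    PySem.Chars.join [] (a :: ps) = a ++ PySem.Chars.join [] ps := by
  cases ps <;> simp [PySem.Chars.join, List.intercalate]

theorem pvRowOf_nil (t c : List Char) (b : Bool) : pvRowOf t c b [] =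
    [("ticker", String.ofList t), ("cik", String.ofList c)] := by
  cases b <;> simp [pvRowOf, pvSplit1, PySem.Chars.join, List.intercalate]

theorem pvRowOf_tab (t c : List Char) (b : Bool) (l : List Char) :
    pvRowOf t c b ('\t' :: l) = pvRowOf t c true l := by
  cases b <;> simp [pvRowOf, pvSplit1, pvJoin_nil_cons]

theorem pvRowOf_char (t c : List Char) (b : Bool) (x : Char) (l : List Char) (hx : x ≠ '\t') :
    pvRowOf t c b (x :: l) = if b then pvRowOf t (c ++ [x]) b l else pvRowOf (t ++ [x]) c b l := by
  obtain ⟨p, ps, hp⟩ := List.exists_cons_of_ne_nil (pvSplit1_ne_nil '\t' l)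
  cases b <;> simp [pvRowOf, pvSplit1, hx, hp, List.modifyHead, pvJoin_nil_cons]

theorem pvLoop_spec (s : List Char) : ∀ (rows : List (List (String × String)))
    (t c : List Char) (b : Bool),
    (s.foldl pvStepA (rows, t, c, b)).1 = rows ++ pvMkRows (pvSplit1 '\n' s) t c b := by
  induction s with
  | nil => intro rows t c b; simp [pvSplit1, pvMkRows]
  | cons x xs ih =>
    intro rows t c b
    by_cases hn : x = '\n'
    · subst hn
      simp only [List.foldl_cons, pvStepA]
      norm_num
      rw [ih]
      obtain ⟨l, ls, hl⟩ := List.exists_cons_of_ne_nil (pvSplit1_ne_nil '\n' xs)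
      simp [pvSplit1, hl, pvMkRows, pvRowOf_nil]
    · by_cases ht : x = '\t'
      · subst ht
        simp only [List.foldl_cons, pvStepA]
        norm_num
        rw [ih]
        obtain ⟨l, ls, hl⟩ := List.exists_cons_of_ne_nil (pvSplit1_ne_nil '\n' xs)
        have : pvSplit1 '\n' ('\t' :: xs) = ('\t' :: l) :: ls := by
          simp [pvSplit1, hl, List.modifyHead]
        rw [this, hl]
        cases ls with
        | nil => simp [pvMkRows]
        | cons l' ls' => simp [pvMkRows, pvRowOf_tab]
      · simp only [List.foldl_cons, pvStepA]
        simp only [if_neg ht, if_neg hn]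
        obtain ⟨l, ls, hl⟩ := List.exists_cons_of_ne_nil (pvSplit1_ne_nil '\n' xs)
        have hsplit : pvSplit1 '\n' (x :: xs) = (x :: l) :: ls := by
          simp [pvSplit1, hn, hl, List.modifyHead]
        rw [hsplit]
        cases b with
        | false =>
          simp only [Bool.false_eq_true, if_false]
          rw [ih]
          cases ls with
          | nil => simp [pvMkRows, hl]
          | cons l' ls' => simp [pvMkRows, hl, pvRowOf_char t c false x l ht]
        | true =>
          simp only [if_true]
          rw [ih]
          cases ls with
          | nil => simp [pvMkRows, hl]
          | cons l' ls' => simp [pvMkRows, hl, pvRowOf_char t c true x l ht]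

theorem pvMkRows_eq_map (L : List (List Char)) :
    pvMkRows L [] [] false = L.dropLast.map (fun line => pvRowOf [] [] false line) := by
  induction L with
  | nil => simp [pvMkRows]
  | cons l ls ih =>
    cases ls with
    | nil => simp [pvMkRows]
    | cons l' ls' =>
      simp only [pvMkRows, List.dropLast_cons₂, List.map_cons]
      rw [ih]

-- ===== VERDICT (by name: the statement is the Claim_ definition above) =====
theorem parse_ticker_cik_txt_spec : Claim_equal_parse_ticker_cik_txt := by
  intro txt _
  unfold Spec_parse_ticker_cik_txt parse_ticker_cik_txt parse_ticker_cik_txt_alt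
  rw [pvLoop_spec txt.toList [] [] [] false, pvSplitOn_single, pvMkRows_eq_map,
    PySem.List.slice_to_neg_one]
  refine List.map_congr_left (fun line _ => ?_)
  rw [pvSplitOn_single]
  obtain ⟨p, ps, hp⟩ := List.exists_cons_of_ne_nil (pvSplit1_ne_nil '\t' line)
  simp [pvRowOf, hp]
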